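-- pv_equiv track=rewrite | github.com/mulggo/mcp | application/trans.py | process_subsection
-- ===== SOURCE A (Python) =====
-- def process_subsection(title, content):
--     """Process a subsection with subtitle-details structure"""
--     html = f'<div class="subtitle-details">\n'
--
--     # Get text after ### as title
--     if title.startswith('### '):
--         title = title[4:]  # Remove ###
--
--     def process_bold_text(text):
--         """Convert **text** to <strong>text</strong>"""
--         processed_text = text
--         while '**' in processed_text:
--             start = processed_text.find('**')
--             end = processed_text.find('**', start + 2)
--             if end != -1:
--                 bold_text = processed_text[start+2:end]
--                 processed_text = processed_text[:start] + f'<strong>{bold_text}</strong>' + processed_text[end+2:]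
--             else:
--                 break
--         return processed_text
--
--     def process_image(text):
--         """Convert ![alt](url) to <img> tag"""
--         if '![' in text and '](' in text:
--             alt_start = text.find('![') + 2
--             alt_end = text.find(']', alt_start)
--             url_start = text.find('(', alt_end) + 1
--             url_end = text.find(')', url_start)
--
--             if alt_end != -1 and url_end != -1:
--                 alt_text = text[alt_start:alt_end]
--                 url = text[url_start:url_end]
--                 return f'<img src="{url}" alt="{alt_text}" class="markdown-image">'
--         return text
--
--     html += f'<div class="body">\n'
--     html += f'<h3>{process_bold_text(title)}</h3>\n'
--
--     current_list_type = None
--     for line in content: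
--         if line.strip():
--             if line.startswith('- '):
--                 if current_list_type != 'ul':
--                     if current_list_type == 'ol':
--                         html += '</ol>\n'
--                     html += '<ul class="dot-list">\n'
--                     current_list_type = 'ul'
--                 processed_line = process_bold_text(line[2:])
--                 processed_line = process_image(processed_line)
--                 html += f'<li class="dot-item">{processed_line}</li>\n'
--             elif line.startswith('* '):
--                 if current_list_type != 'ul':
--                     if current_list_type == 'ol':
--                         html += '</ol>\n'
--                     html += '<ul class="dot-list">\n'
--                     current_list_type = 'ul'
--                 processed_line = process_bold_text(line[2:])
--                 processed_line = process_image(processed_line)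
--                 html += f'<li class="star-item">{processed_line}</li>\n'
--             elif any(line.strip().startswith(f'{i}.') for i in range(1, 10)):
--                 if current_list_type != 'ol':
--                     if current_list_type == 'ul':
--                         html += '</ul>\n'
--                     html += '<ol>\n'
--                     current_list_type = 'ol'
--                 number = line.split('.', 1)[0]
--                 processed_line = process_bold_text(line.split(".", 1)[1].strip())
--                 processed_line = process_image(processed_line)
--                 html += f'<li value="{number}">{processed_line}</li>\n'
--             else:
--                 if current_list_type:
--                     if current_list_type == 'ol':
--                         html += '</ol>\n'
--                     elif current_list_type == 'ul':
--                         html += '</ul>\n'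
--                     current_list_type = None
--                 processed_line = process_bold_text(line.strip())
--                 processed_line = process_image(processed_line)
--                 html += f'<p>{processed_line}</p>\n'
--
--     if current_list_type:
--         if current_list_type == 'ol':
--             html += '</ol>\n'
--         elif current_list_type == 'ul':
--             html += '</ul>\n'
--
--     html += '</div>\n'
--     html += '</div>\n'
--
--     return html
-- ===== SOURCE B (Python) =====
-- def process_subsection(title, content):
--     """Two-pass rewrite: classify lines into (kind, item) tokens, group
--     consecutive same-kind list tokens, then render each group at once."""
--
--     def process_bold_text(text):
--         """Convert **text** to <strong>text</strong>"""
--         processed_text = text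
--         while '**' in processed_text:
--             start = processed_text.find('**')
--             end = processed_text.find('**', start + 2)
--             if end != -1:
--                 bold_text = processed_text[start+2:end]
--                 processed_text = processed_text[:start] + f'<strong>{bold_text}</strong>' + processed_text[end+2:]
--             else:
--                 break
--         return processed_text
--
--     def process_image(text):
--         """Convert ![alt](url) to <img> tag"""
--         if '![' in text and '](' in text:
--             alt_start = text.find('![') + 2
--             alt_end = text.find(']', alt_start)
--             url_start = text.find('(', alt_end) + 1
--             url_end = text.find(')', url_start)
--             if alt_end != -1 and url_end != -1:
--                 alt_text = text[alt_start:alt_end]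
--                 url = text[url_start:url_end]
--                 return f'<img src="{url}" alt="{alt_text}" class="markdown-image">'
--         return text
--
--     if title.startswith('### '):
--         title = title[4:]
--
--     def classify(line):
--         if not line.strip():
--             return None
--         if line.startswith('- '):
--             return ('ul', f'<li class="dot-item">{process_image(process_bold_text(line[2:]))}</li>\n')
--         if line.startswith('* '):
--             return ('ul', f'<li class="star-item">{process_image(process_bold_text(line[2:]))}</li>\n')
--         if any(line.strip().startswith(f'{i}.') for i in range(1, 10)):
--             number = line.split('.', 1)[0]
--             body = process_image(process_bold_text(line.split('.', 1)[1].strip()))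
--             return ('ol', f'<li value="{number}">{body}</li>\n')
--         return ('p', f'<p>{process_image(process_bold_text(line.strip()))}</p>\n')
--
--     def group(tokens):
--         groups = []
--         for kind, item in tokens:
--             if groups and groups[-1][0] == kind and kind != 'p':
--                 groups[-1][1].append(item)
--             else:
--                 groups.append([kind, [item]])
--         return groups
--
--     tokens = [t for t in map(classify, content) if t is not None]
--     OPEN = {'ul': '<ul class="dot-list">\n', 'ol': '<ol>\n', 'p': ''}
--     CLOSE = {'ul': '</ul>\n', 'ol': '</ol>\n', 'p': ''}
--     body = ''.join(OPEN[k] + ''.join(items) + CLOSE[k] for k, items in group(tokens))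
--     return ('<div class="subtitle-details">\n<div class="body">\n'
--             f'<h3>{process_bold_text(title)}</h3>\n' + body + '</div>\n</div>\n')
-- ===== Notes on version B (the rewrite author's own statement) =====
-- stated objective: alternative
-- what changed: A's single stateful loop that interleaves classification with emitting open/close tags is replaced by a two-pass pipeline: classify each non-blank line into a (kind, rendered-item) token, group consecutive same-kind list tokens, then render each group as a self-contained open+items+close block.
import Mathlib
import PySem

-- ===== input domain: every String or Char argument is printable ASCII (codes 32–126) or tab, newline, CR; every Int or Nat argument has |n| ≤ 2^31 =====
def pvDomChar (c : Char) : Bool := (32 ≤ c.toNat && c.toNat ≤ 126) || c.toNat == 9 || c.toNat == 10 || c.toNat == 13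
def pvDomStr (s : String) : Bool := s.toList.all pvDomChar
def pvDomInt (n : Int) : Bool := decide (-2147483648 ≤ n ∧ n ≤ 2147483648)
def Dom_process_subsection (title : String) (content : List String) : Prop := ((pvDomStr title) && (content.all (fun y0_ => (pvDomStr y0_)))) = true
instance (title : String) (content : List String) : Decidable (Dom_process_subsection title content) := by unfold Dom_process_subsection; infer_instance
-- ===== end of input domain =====

-- B re-decomposes A's single stateful emit loop into classify → group-runs → render-blocks; same output, same cost (objective: alternative).

-- ===== PORT A =====
inductive PvLK | ul | ol
deriving DecidableEq, Repr

-- process_bold_text, shared verbatim by Source A and Source B; fuel bounds the while loop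
-- (each iteration removes four '*' characters, so length+1 iterations always suffice)
def pvBold : Nat → List Char → List Char
  | 0, t => t
  | fuel+1, t =>
    if PySem.Chars.isIn "**".toList t then
      let start := PySem.Chars.find t "**".toList
      let e := PySem.Chars.findFrom t "**".toList (start + 2) none
      if e ≠ -1 then
        let bold := PySem.Chars.slice t (some (start+2)) (some e)
        pvBold fuel (PySem.Chars.slice t none (some start) ++ "<strong>".toList ++ bold
          ++ "</strong>".toList ++ PySem.Chars.slice t (some (e+2)) none)
      else t
    else t

-- process_image, shared verbatim by Source A and Source B
def pvImage (t : List Char) : List Char :=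
  if PySem.Chars.isIn "![".toList t && PySem.Chars.isIn "](".toList t then
    let altStart := PySem.Chars.find t "![".toList + 2
    let altEnd := PySem.Chars.findFrom t "]".toList altStart none
    let urlStart := PySem.Chars.findFrom t "(".toList altEnd none + 1
    let urlEnd := PySem.Chars.findFrom t ")".toList urlStart none
    if altEnd ≠ -1 ∧ urlEnd ≠ -1 then
      "<img src=\"".toList ++ PySem.Chars.slice t (some urlStart) (some urlEnd)
        ++ "\" alt=\"".toList ++ PySem.Chars.slice t (some altStart) (some altEnd)
        ++ "\" class=\"markdown-image\">".toList
    else t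
  else t

-- the trailing 'if current_list_type: …' close of A
def pvCloseSt : Option PvLK → List Char
  | some .ol => "</ol>\n".toList
  | some .ul => "</ul>\n".toList
  | none => []

-- the body of A's 'for line in content' loop; state = (html so far, current_list_type)
def pvStepA (p : List Char × Option PvLK) (l : List Char) : List Char × Option PvLK :=
  if PySem.Chars.strip l ≠ [] then
    if PySem.Chars.startswith l "- ".toList then
      let p := if p.2 ≠ some PvLK.ul then
          (p.1 ++ (if p.2 = some PvLK.ol then "</ol>\n".toList else [])
            ++ "<ul class=\"dot-list\">\n".toList, some PvLK.ul)
        else p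
      let x := PySem.Chars.slice l (some 2) none
      (p.1 ++ "<li class=\"dot-item\">".toList ++ pvImage (pvBold (x.length + 1) x) ++ "</li>\n".toList, p.2)
    else if PySem.Chars.startswith l "* ".toList then
      let p := if p.2 ≠ some PvLK.ul then
          (p.1 ++ (if p.2 = some PvLK.ol then "</ol>\n".toList else [])
            ++ "<ul class=\"dot-list\">\n".toList, some PvLK.ul)
        else p
      let x := PySem.Chars.slice l (some 2) none
      (p.1 ++ "<li class=\"star-item\">".toList ++ pvImage (pvBold (x.length + 1) x) ++ "</li>\n".toList, p.2)
    else if (PySem.List.pyRange 1 10 1).any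
        (fun i => PySem.Chars.startswith (PySem.Chars.strip l) (PySem.Int.toChars i ++ ['.'])) then
      let p := if p.2 ≠ some PvLK.ol then
          (p.1 ++ (if p.2 = some PvLK.ul then "</ul>\n".toList else []) ++ "<ol>\n".toList, some PvLK.ol)
        else p
      let parts := (PySem.Chars.splitMax? l ['.'] 1).getD []
      let number := (PySem.List.pyGet? parts 0).getD []
      let x := PySem.Chars.strip ((PySem.List.pyGet? parts 1).getD [])
      (p.1 ++ "<li value=\"".toList ++ number ++ "\">".toList
        ++ pvImage (pvBold (x.length + 1) x) ++ "</li>\n".toList, p.2)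
    else
      let p := if p.2 ≠ none then (p.1 ++ pvCloseSt p.2, none) else p
      let x := PySem.Chars.strip l
      (p.1 ++ "<p>".toList ++ pvImage (pvBold (x.length + 1) x) ++ "</p>\n".toList, p.2)
  else p

def process_subsection (title : String) (content : List String) : String :=
  let html := "<div class=\"subtitle-details\">\n".toList
  let t := if PySem.Chars.startswith title.toList "### ".toList
    then PySem.Chars.slice title.toList (some 4) none else title.toList
  let html := html ++ "<div class=\"body\">\n".toList
  let html := html ++ "<h3>".toList ++ pvBold (t.length + 1) t ++ "</h3>\n".toList
  let r := content.foldl (fun p line => pvStepA p line.toList) (html, none)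
  let html := r.1 ++ pvCloseSt r.2
  String.ofList (html ++ "</div>\n".toList ++ "</div>\n".toList)

-- ===== PORT B =====
inductive PvTK | ul | ol | p
deriving DecidableEq, Repr

-- Source B's classify: blank → None, else (kind, fully rendered <li>/<p> item)
def pvClassify (l : List Char) : Option (PvTK × List Char) :=
  if PySem.Chars.strip l = [] then none
  else if PySem.Chars.startswith l "- ".toList then
    let x := PySem.Chars.slice l (some 2) none
    some (.ul, "<li class=\"dot-item\">".toList ++ pvImage (pvBold (x.length + 1) x) ++ "</li>\n".toList)
  else if PySem.Chars.startswith l "* ".toList then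
    let x := PySem.Chars.slice l (some 2) none
    some (.ul, "<li class=\"star-item\">".toList ++ pvImage (pvBold (x.length + 1) x) ++ "</li>\n".toList)
  else if (PySem.List.pyRange 1 10 1).any
      (fun i => PySem.Chars.startswith (PySem.Chars.strip l) (PySem.Int.toChars i ++ ['.'])) then
    let parts := (PySem.Chars.splitMax? l ['.'] 1).getD []
    let number := (PySem.List.pyGet? parts 0).getD []
    let x := PySem.Chars.strip ((PySem.List.pyGet? parts 1).getD [])
    some (.ol, "<li value=\"".toList ++ number ++ "\">".toList
      ++ pvImage (pvBold (x.length + 1) x) ++ "</li>\n".toList)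
  else
    let x := PySem.Chars.strip l
    some (.p, "<p>".toList ++ pvImage (pvBold (x.length + 1) x) ++ "</p>\n".toList)

-- Source B's group loop: append each token, merging it into the last group when kinds
-- match and the kind is not 'p' (maximal runs of consecutive equal non-'p' kinds)
def pvGStep (gs : List (PvTK × List (List Char))) (kh : PvTK × List Char) : List (PvTK × List (List Char)) :=
  match gs.getLast? with
  | some g => if g.1 = kh.1 ∧ kh.1 ≠ .p then gs.dropLast ++ [(kh.1, g.2 ++ [kh.2])] else gs ++ [(kh.1, [kh.2])]
  | none => gs ++ [(kh.1, [kh.2])]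

def pvGroupL (ts : List (PvTK × List Char)) : List (PvTK × List (List Char)) := ts.foldl pvGStep []

def pvOpen : PvTK → List Char
  | .ul => "<ul class=\"dot-list\">\n".toList
  | .ol => "<ol>\n".toList
  | .p => []

def pvClose : PvTK → List Char
  | .ul => "</ul>\n".toList
  | .ol => "</ol>\n".toList
  | .p => []

def pvRender (g : PvTK × List (List Char)) : List Char := pvOpen g.1 ++ g.2.flatten ++ pvClose g.1

def process_subsection_alt (title : String) (content : List String) : String :=
  let t := if PySem.Chars.startswith title.toList "### ".toList
    then PySem.Chars.slice title.toList (some 4) none else title.toList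
  String.ofList ("<div class=\"subtitle-details\">\n<div class=\"body\">\n<h3>".toList
    ++ pvBold (t.length + 1) t ++ "</h3>\n".toList
    ++ ((pvGroupL (content.filterMap (fun l => pvClassify l.toList))).flatMap pvRender)
    ++ "</div>\n</div>\n".toList)

-- ===== PRECONDITION & SPEC =====
def Spec_process_subsection (title : String) (content : List String) (out : String) : Prop := out = process_subsection_alt title content
instance (title : String) (content : List String) (out : String) : Decidable (Spec_process_subsection title content out) := by unfold Spec_process_subsection; infer_instance

-- ===== CLAIM (what is proved, stated in full; the proofs are below) =====
def Claim_equal_process_subsection : Prop := ∀ (title : String) (content : List String), Dom_process_subsection title content → Spec_process_subsection title content (process_subsection title content)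

-- ===== LEMMAS AND PROOFS =====

-- proof-side: front-recursive grouping, proved equal to the port's foldl grouping
def pvGroup : List (PvTK × List Char) → List (PvTK × List (List Char))
  | [] => []
  | (k, h) :: ts =>
    match pvGroup ts with
    | [] => [(k, [h])]
    | (k', hs) :: gs => if k' = k ∧ k ≠ .p then (k, h :: hs) :: gs else (k, [h]) :: (k', hs) :: gs

def pvF (kh : PvTK × List Char) (gs : List (PvTK × List (List Char))) : List (PvTK × List (List Char)) :=
  match gs with
  | [] => [(kh.1, [kh.2])]
  | (k', hs) :: gs' => if k' = kh.1 ∧ kh.1 ≠ .p then (kh.1, kh.2 :: hs) :: gs' else (kh.1, [kh.2]) :: (k', hs) :: gs'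

lemma pvGroup_cons (kh : PvTK × List Char) (ts : List (PvTK × List Char)) :
    pvGroup (kh :: ts) = pvF kh (pvGroup ts) := by
  obtain ⟨k, h⟩ := kh; rfl

lemma pvGStep_cons₂ (g1 g2 : PvTK × List (List Char)) (G2 : List (PvTK × List (List Char)))
    (t : PvTK × List Char) : pvGStep (g1 :: g2 :: G2) t = g1 :: pvGStep (g2 :: G2) t := by
  unfold pvGStep
  rw [List.getLast?_cons_cons]
  cases hl : (g2 :: G2).getLast? with
  | none => simp at hl
  | some g => dsimp only; split_ifs <;> simp [List.dropLast_cons₂]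

lemma pv_FG (x t : PvTK × List Char) (G : List (PvTK × List (List Char))) :
    pvF x (pvGStep G t) = pvGStep (pvF x G) t := by
  obtain ⟨k0, h0⟩ := x
  obtain ⟨k, h⟩ := t
  cases G with
  | nil => cases k0 <;> cases k <;> simp [pvF, pvGStep]
  | cons g1 G1 =>
    cases G1 with
    | nil =>
      obtain ⟨k1, hs1⟩ := g1
      cases k0 <;> cases k <;> cases k1 <;> simp [pvF, pvGStep]
    | cons g2 G2 =>
      obtain ⟨k1, hs1⟩ := g1
      rw [pvGStep_cons₂]
      by_cases hm : k1 = k0 ∧ k0 ≠ PvTK.p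
      · simp only [pvF, if_pos hm]
        rw [pvGStep_cons₂]
      · simp only [pvF, if_neg hm]
        rw [pvGStep_cons₂, pvGStep_cons₂]

lemma pv_gstep_snoc (ts : List (PvTK × List Char)) (t : PvTK × List Char) :
    pvGroup (ts ++ [t]) = pvGStep (pvGroup ts) t := by
  induction ts with
  | nil => obtain ⟨k, h⟩ := t; simp [pvGroup, pvGStep]
  | cons x ts ih =>
    rw [List.cons_append, pvGroup_cons, ih, pv_FG, ← pvGroup_cons]

lemma pv_groupL_eq (ts : List (PvTK × List Char)) : pvGroupL ts = pvGroup ts := by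
  induction ts using List.reverseRecOn with
  | nil => rfl
  | append_singleton ts t ih =>
    unfold pvGroupL at ih ⊢
    rw [List.foldl_append, List.foldl_cons, List.foldl_nil, ih]
    exact (pv_gstep_snoc ts t).symm

-- proof-side vocabulary: A's state after a token of kind k, and the tag text A emits on a kind transition
def pvNext : PvTK → Option PvLK
  | .ul => some .ul
  | .ol => some .ol
  | .p => none

def pvTrans : Option PvLK → PvTK → List Char
  | some .ul, .ul => []
  | some .ol, .ul => ("</ol>\n".toList ++ "<ul class=\"dot-list\">\n".toList)
  | none, .ul => "<ul class=\"dot-list\">\n".toList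
  | some .ol, .ol => []
  | some .ul, .ol => ("</ul>\n".toList ++ "<ol>\n".toList)
  | none, .ol => "<ol>\n".toList
  | some .ul, .p => "</ul>\n".toList
  | some .ol, .p => "</ol>\n".toList
  | none, .p => []

def pvEmit : Option PvLK → List (PvTK × List Char) → List Char
  | st, [] => pvCloseSt st
  | st, (k, h) :: ts => pvTrans st k ++ h ++ pvEmit (pvNext k) ts

def pvRenderFrom : Option PvLK → List (PvTK × List (List Char)) → List Char
  | st, [] => pvCloseSt st
  | st, (k, hs) :: gs => pvTrans st k ++ hs.flatten ++ pvRenderFrom (pvNext k) gs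

def pvChainP (g g' : PvTK × List (List Char)) : Prop := g.1 = .p ∨ g'.1 ≠ g.1

lemma pv_step_eq (st : Option PvLK) (acc l : List Char) :
    pvStepA (acc, st) l = match pvClassify l with
      | none => (acc, st)
      | some kh => (acc ++ pvTrans st kh.1 ++ kh.2, pvNext kh.1) := by
  unfold pvStepA pvClassify
  rcases st with _ | lk
  · dsimp only
    split_ifs <;> simp_all [pvTrans, pvNext, pvCloseSt]
  · cases lk <;> (dsimp only; split_ifs <;> simp_all [pvTrans, pvNext, pvCloseSt])

lemma pv_fold (ls : List String) (acc : List Char) (st : Option PvLK) :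
    (ls.foldl (fun p line => pvStepA p line.toList) (acc, st)).1
      ++ pvCloseSt (ls.foldl (fun p line => pvStepA p line.toList) (acc, st)).2
    = acc ++ pvEmit st (ls.filterMap (fun l => pvClassify l.toList)) := by
  induction ls generalizing acc st with
  | nil => simp [pvEmit]
  | cons l ls ih =>
    simp only [List.foldl_cons, List.filterMap_cons]
    rw [pv_step_eq]
    cases hc : pvClassify l.toList with
    | none => simp [ih]
    | some kh =>
      obtain ⟨k, h⟩ := kh
      simp [pvEmit, ih]

lemma pv_emit_group (ts : List (PvTK × List Char)) : ∀ (k : PvTK),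
    pvEmit (pvNext k) ts = pvRenderFrom (pvNext k) (pvGroup ts) := by
  induction ts with
  | nil => intro k; rfl
  | cons t ts ih =>
    intro k
    obtain ⟨k', h⟩ := t
    cases hg : pvGroup ts with
    | nil =>
      have ih' := ih k'
      rw [hg] at ih'
      simp [pvGroup, hg, pvEmit, pvRenderFrom, ih']
    | cons g gs =>
      obtain ⟨k'', hs⟩ := g
      have ih' := ih k'
      rw [hg] at ih'
      by_cases hm : k'' = k' ∧ k' ≠ PvTK.p
      · obtain ⟨rfl, hp⟩ := hm
        have e0 : pvTrans (pvNext k'') k'' = [] := by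
          cases k'' with
          | p => exact absurd rfl hp
          | ul => rfl
          | ol => rfl
        simp [pvGroup, hg, hp, pvEmit, pvRenderFrom, ih', e0]
      · simp [pvGroup, hg, hm, pvEmit, pvRenderFrom, ih']

lemma pv_group_chain (ts : List (PvTK × List Char)) : List.IsChain pvChainP (pvGroup ts) := by
  induction ts with
  | nil => simp [pvGroup]
  | cons t ts ih =>
    obtain ⟨k', h⟩ := t
    cases hg : pvGroup ts with
    | nil => simp [pvGroup, hg]
    | cons g gs =>
      obtain ⟨k'', hs⟩ := g
      rw [hg] at ih
      by_cases hm : k'' = k' ∧ k' ≠ PvTK.p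
      · obtain ⟨rfl, hp⟩ := hm
        simp only [pvGroup, hg]
        rw [if_pos (show True ∧ k'' ≠ PvTK.p from ⟨trivial, hp⟩)]
        cases gs with
        | nil => simp
        | cons g2 gs2 =>
          rw [List.isChain_cons_cons] at ih ⊢
          exact ⟨ih.1, ih.2⟩
      · simp only [pvGroup, hg, if_neg hm]
        rw [List.isChain_cons_cons]
        refine ⟨?_, ih⟩
        unfold pvChainP
        by_cases hp : k' = PvTK.p
        · exact Or.inl hp
        · exact Or.inr (fun he => hm ⟨he, hp⟩)

lemma pv_trans_split (k' k : PvTK) (h : k' = .p ∨ k ≠ k') :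
    pvTrans (pvNext k') k = pvClose k' ++ pvOpen k := by
  rcases h with h | h
  · subst h; cases k <;> rfl
  · cases k' <;> cases k <;> simp_all [pvNext, pvTrans, pvClose, pvOpen]

lemma pv_closeSt_next (k : PvTK) : pvCloseSt (pvNext k) = pvClose k := by
  cases k <;> rfl

lemma pv_rf_flat (gs : List (PvTK × List (List Char))) : ∀ (k' : PvTK),
    (match gs with | [] => True | g :: _ => (k' = .p ∨ g.1 ≠ k')) →
    List.IsChain pvChainP gs →
    pvRenderFrom (pvNext k') gs = pvClose k' ++ gs.flatMap pvRender := by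
  induction gs with
  | nil =>
    intro k' _ _
    simp [pvRenderFrom, pv_closeSt_next]
  | cons g gs ih =>
    intro k' hsep hch
    obtain ⟨k, hs⟩ := g
    have h1 : pvTrans (pvNext k') k = pvClose k' ++ pvOpen k := pv_trans_split k' k hsep
    cases gs with
    | nil =>
      simp [pvRenderFrom, pvRender, h1, pv_closeSt_next]
    | cons g2 gs2 =>
      rw [List.isChain_cons_cons] at hch
      have ih2 := ih k hch.1 hch.2
      calc pvRenderFrom (pvNext k') ((k, hs) :: g2 :: gs2)
          = pvTrans (pvNext k') k ++ hs.flatten ++ pvRenderFrom (pvNext k) (g2 :: gs2) := rfl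
        _ = pvClose k' ++ List.flatMap pvRender ((k, hs) :: g2 :: gs2) := by
            rw [ih2, h1]
            simp [pvRender, List.append_assoc]

lemma pv_final (title : String) (content : List String) :
    process_subsection title content = process_subsection_alt title content := by
  simp only [process_subsection, process_subsection_alt]
  congr 1
  rw [pv_groupL_eq]
  rw [pv_fold]
  rw [show (none : Option PvLK) = pvNext PvTK.p from rfl]
  rw [pv_emit_group]
  rw [pv_rf_flat _ PvTK.p
    (by cases pvGroup (content.filterMap fun l => pvClassify l.toList) <;> simp)
    (pv_group_chain _)]
  simp only [pvClose, List.nil_append, List.append_assoc]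
  rw [show ("</div>\n".toList ++ "</div>\n".toList : List Char) = "</div>\n</div>\n".toList by decide]
  rw [← List.append_assoc, ← List.append_assoc]
  rw [show (("<div class=\"subtitle-details\">\n".toList ++ "<div class=\"body\">\n".toList) ++ "<h3>".toList : List Char)
      = "<div class=\"subtitle-details\">\n<div class=\"body\">\n<h3>".toList by decide]

-- ===== VERDICT (by name: the statement is the Claim_ definition above) =====
theorem process_subsection_spec : Claim_equal_process_subsection := by
  intro title content _
  unfold Spec_process_subsection
  exact pv_final title content
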